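-- pv_equiv track=rewrite | github.com/meo-s/problem-solving | 19000/100/19160_Regular_Forestation/BJ_19160_Regular_Forestation.py | hash_tree
-- ===== SOURCE A (Python) =====
-- from operator import itemgetter
--
-- def hash_tree(tree, uniques, u, p=-1):
--     subtrees = {}
--     for v in tree[u]:
--         if v != p:
--             subtree_index = hash_tree(tree, uniques, v, u)
--             subtrees[subtree_index] = subtrees.get(subtree_index, 0) + 1
--
--     subtree_hashs = ['R']
--     for subtree_index, subtree_count in sorted(subtrees.items(), key=itemgetter(0)):
--         subtree_hashs += [f'{subtree_index})'] * subtree_count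
--
--     tree_hash = ''.join(subtree_hashs)
--     if tree_hash not in uniques:
--         uniques[tree_hash] = len(uniques)
--
--     return uniques[tree_hash]
-- ===== SOURCE B (Python) =====
-- def hash_tree(tree, uniques, u, p=-1):
--     # Iterative post-order DFS with an explicit stack instead of recursion.
--     # Each expanded frame owns a slot collecting its finished children's hash ids.
--     slots = [[]]                 # slots[s]: child ids gathered for the frame owning slot s
--     stack = [(u, p, 0)]          # visit frame: (node, parent, parent's slot)
--     while stack:
--         frame = stack.pop()
--         if len(frame) == 3:
--             node, par, pslot = frame
--             slot = len(slots)
--             slots.append([])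
--             stack.append((slot, pslot))          # finalize frame: (own slot, parent's slot)
--             for v in reversed(tree[node]):
--                 if v != par:
--                     stack.append((v, node, slot))
--         else:
--             slot, pslot = frame
--             tree_hash = 'R' + ''.join(f'{i})' for i in sorted(slots[slot]))
--             if tree_hash not in uniques:
--                 uniques[tree_hash] = len(uniques)
--             slots[pslot].append(uniques[tree_hash])
--     return slots[0][0]
-- ===== Notes on version B (the rewrite author's own statement) =====
-- stated objective: alternative
-- what changed: B replaces A's recursion by an iterative post-order DFS over an explicit stack of (node, parent, slot) frames, collecting each frame's finished child ids in a per-frame slot and sorting that list directly, instead of A's recursive count-dict + sorted-items expansion; Pre_ excludes exactly the inputs where A raises (KeyError on a missing key, RecursionError on a cycle).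
import Mathlib
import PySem

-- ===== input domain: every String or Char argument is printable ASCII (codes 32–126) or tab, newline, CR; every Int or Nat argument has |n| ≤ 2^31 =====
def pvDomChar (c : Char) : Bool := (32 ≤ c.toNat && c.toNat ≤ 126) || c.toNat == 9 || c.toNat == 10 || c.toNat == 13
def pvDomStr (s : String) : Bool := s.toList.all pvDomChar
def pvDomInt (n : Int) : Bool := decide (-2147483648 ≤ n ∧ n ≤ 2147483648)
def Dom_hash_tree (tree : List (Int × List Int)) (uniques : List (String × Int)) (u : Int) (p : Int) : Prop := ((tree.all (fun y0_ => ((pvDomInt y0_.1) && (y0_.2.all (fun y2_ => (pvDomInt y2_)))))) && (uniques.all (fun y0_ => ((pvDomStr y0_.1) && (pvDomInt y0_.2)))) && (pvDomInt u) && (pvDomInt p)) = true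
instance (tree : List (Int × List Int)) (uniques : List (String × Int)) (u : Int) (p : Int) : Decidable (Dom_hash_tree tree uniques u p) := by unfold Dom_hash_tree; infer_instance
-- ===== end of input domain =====

-- B replaces A's recursion by an iterative post-order traversal over an explicit stack
-- (alternative decomposition, same cost); equivalence is about the RETURN value (on admitted
-- inputs both Pythons also mutate `uniques` identically).

-- ===== PORT A =====
-- A's recursion, with a fuel guard making it total (under Pre_ the fuel never runs out);
-- `none` marks exactly the inputs where the Python raises (KeyError / RecursionError).
def hashA (tree : List (Int × List Int)) : Nat → PySem.Dict String Int → Int → Int → Option (Int × PySem.Dict String Int)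
  | 0, _, _, _ => none
  | fuel+1, uniques, u, p =>
    match (PySem.Dict.ofList tree).get? u with
    | none => none
    | some neigh =>
      match neigh.foldl (fun acc v =>
          match acc with
          | none => none
          | some (subtrees, uq) =>
            if v = p then some (subtrees, uq)
            else
              match hashA tree fuel uq v u with
              | none => none
              | some (idx, uq') => some (subtrees.insert idx (subtrees.getD idx 0 + 1), uq'))
        (some ((PySem.Dict.empty : PySem.Dict Int Int), uniques)) with
      | none => none
      | some (subtrees, uq) =>
        let items := PySem.List.sorted subtrees.items (fun kv => kv.1) false
        let tree_hash := PySem.Str.join "" ("R" :: items.flatMap (fun kv => List.replicate kv.2.toNat (PySem.Int.toStr kv.1 ++ ")")))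
        let uq2 := if uq.contains tree_hash then uq else uq.insert tree_hash (uq.size : Int)
        match uq2.get? tree_hash with
        | none => none
        | some i => some (i, uq2)

def hash_tree (tree : List (Int × List Int)) (uniques : List (String × Int)) (u : Int) (p : Int) : Int :=
  match hashA tree (2 * tree.length + 2) (PySem.Dict.ofList uniques) u p with
  | some (r, _) => r
  | none => 0

-- ===== PORT B =====
-- The while-loop of Source B. Stack frames: Sum.inl (node, parent, parent's slot) is an unexpanded
-- visit frame, Sum.inr (own slot, parent's slot) a finalize frame; Python pushes reversed
-- adjacency and pops from the end, so popped order is adjacency order — the stack is modelled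
-- head-as-top with children frames in adjacency order. `slots[s]` collects finished child ids.
-- All slot indices are in range by construction, so List.getD mirrors Python's indexing exactly.
def runB (tree : List (Int × List Int)) : Nat → List ((Int × Int × Nat) ⊕ (Nat × Nat)) → List (List Int) → PySem.Dict String Int → Option Int
  | _, [], slots, _ => some ((slots.getD 0 []).getD 0 0)     -- return slots[0][0]
  | 0, _ :: _, _, _ => none
  | fuel+1, Sum.inl (node, par, pslot) :: rest, slots, uq =>
    match (PySem.Dict.ofList tree).get? node with
    | none => none
    | some neigh =>
      runB tree fuel
        ((neigh.filter (fun v => v ≠ par)).map (fun v => Sum.inl (v, node, slots.length))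
          ++ Sum.inr (slots.length, pslot) :: rest)
        (slots ++ [[]]) uq
  | fuel+1, Sum.inr (slot, pslot) :: rest, slots, uq =>
    let ids := slots.getD slot []
    let tree_hash := "R" ++ PySem.Str.join "" ((PySem.List.sorted ids (fun x => x) false).map (fun i => PySem.Int.toStr i ++ ")"))
    let uq2 := if uq.contains tree_hash then uq else uq.insert tree_hash (uq.size : Int)
    match uq2.get? tree_hash with
    | none => none
    | some i => runB tree fuel rest (slots.set pslot ((slots.getD pslot []) ++ [i])) uq2

def pvW (tree : List (Int × List Int)) : Nat := 2 + (tree.map (fun kv => kv.2.length)).sum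

def hash_tree_alt (tree : List (Int × List Int)) (uniques : List (String × Int)) (u : Int) (p : Int) : Int :=
  match runB tree (pvW tree ^ (2 * tree.length + 2)) [Sum.inl (u, p, 0)] [[]] (PySem.Dict.ofList uniques) with
  | some r => r
  | none => 0

-- ===== PRECONDITION & SPEC =====
-- Shape condition on the input graph: the DFS from u (skipping the parent edge) stays within
-- tree's keys and terminates (within the stated depth allowance, which covers every input the
-- generator produces) — exactly where Python A returns instead of raising KeyError/RecursionError.
def okDFS (tree : List (Int × List Int)) : Nat → Int → Int → Bool
  | 0, _, _ => false
  | f+1, u, p =>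
    match (PySem.Dict.ofList tree).get? u with
    | none => false
    | some neigh => neigh.all (fun v => v == p || okDFS tree f v u)

-- Pre_ excludes exactly the inputs on which the Python A raises: a visited node missing from
-- tree (KeyError) or a non-terminating / excessively deep DFS (RecursionError).
def Pre_hash_tree (tree : List (Int × List Int)) (uniques : List (String × Int)) (u : Int) (p : Int) : Prop :=
  okDFS tree (2 * tree.length + 2) u p = true
instance (tree : List (Int × List Int)) (uniques : List (String × Int)) (u : Int) (p : Int) : Decidable (Pre_hash_tree tree uniques u p) := by unfold Pre_hash_tree; infer_instance

def pvWitness_hash_tree : (List (Int × List Int)) × (List (String × Int)) × Int × Int :=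
  ([(0, [1, 2]), (1, [0]), (2, [0, 3]), (3, [2])], [("R", 5)], 0, -1)

def Spec_hash_tree (tree : List (Int × List Int)) (uniques : List (String × Int)) (u : Int) (p : Int) (out : Int) : Prop := out = hash_tree_alt tree uniques u p
instance (tree : List (Int × List Int)) (uniques : List (String × Int)) (u : Int) (p : Int) (out : Int) : Decidable (Spec_hash_tree tree uniques u p out) := by unfold Spec_hash_tree; infer_instance

-- ===== CLAIM (what is proved, stated in full; the proofs are below) =====
def Claim_equal_hash_tree : Prop := ∀ (tree : List (Int × List Int)) (uniques : List (String × Int)) (u : Int) (p : Int), Dom_hash_tree tree uniques u p → Pre_hash_tree tree uniques u p → Spec_hash_tree tree uniques u p (hash_tree tree uniques u p)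

-- ===== LEMMAS AND PROOFS =====

-- putting back the entry a (in-range) slot holds is the identity
theorem pv_set_getD_self (l : List (List Int)) (i : Nat) (h : i < l.length) :
    l.set i (l.getD i []) = l := by
  apply List.ext_getElem
  · simp
  · intro k hk hk2
    rw [List.getElem_set]
    split
    · next heq => subst heq; rw [List.getD_eq_getElem?_getD, List.getElem?_eq_getElem h]; rfl
    · rfl

theorem pv_getD_append_left (l e : List (List Int)) (i : Nat) (h : i < l.length) :
    (l ++ e).getD i [] = l.getD i [] := by
  rw [List.getD_eq_getElem?_getD, List.getD_eq_getElem?_getD, List.getElem?_append_left h]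

theorem pv_getD_set_self (l : List (List Int)) (i : Nat) (x : List Int) (h : i < l.length) :
    (l.set i x).getD i [] = x := by
  rw [List.getD_eq_getElem?_getD, List.getElem?_set_self h]; rfl

-- every item of dict(pairs) is one of the pairs
theorem pv_mem_items_ofList (l : List (Int × List Int)) (q : Int × List Int)
    (h : q ∈ (PySem.Dict.ofList l).items) : q ∈ l := by
  have haux : ∀ (t : List (Int × List Int)) (d : PySem.Dict Int (List Int)),
      q ∈ (t.foldl (fun acc p => acc.insert p.1 p.2) d).items → q ∈ d.items ∨ q ∈ t := by
    intro t
    induction t with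
    | nil => intro d h'; exact Or.inl h'
    | cons a t' ih =>
      intro d h'
      rcases ih (d.insert a.1 a.2) h' with h'' | h''
      · rcases (PySem.Dict.mem_items_insert _ _ _ _).mp h'' with h3 | h3
        · exact Or.inr (by rw [h3]; exact List.mem_cons_self)
        · exact Or.inl h3.1
      · exact Or.inr (List.mem_cons_of_mem _ h'')
  rcases haux l PySem.Dict.empty h with h' | h'
  · simp [PySem.Dict.empty] at h'
  · exact h'

theorem pv_neigh_le (tree : List (Int × List Int)) (u : Int) (neigh : List Int)
    (h : (PySem.Dict.ofList tree).get? u = some neigh) : neigh.length + 2 ≤ pvW tree := by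
  have hm : (u, neigh) ∈ tree :=
    pv_mem_items_ofList tree _ (PySem.Dict.mem_items_of_get?_eq_some _ h)
  have : neigh.length ∈ tree.map (fun kv => kv.2.length) :=
    List.mem_map_of_mem (f := fun kv => kv.2.length) hm
  have hle : neigh.length ≤ (tree.map (fun kv => kv.2.length)).sum := List.le_sum_of_mem this
  unfold pvW
  omega

theorem pv_count_flatMap_repl (S : List Int) (n : Int → Nat) (x : Int) (hnd : S.Nodup) :
    (S.flatMap (fun k => List.replicate (n k) k)).count x = if x ∈ S then n x else 0 := by
  induction S with
  | nil => simp
  | cons k t ih =>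
    have hnd' := List.nodup_cons.mp hnd
    rw [List.flatMap_cons, List.count_append, List.count_replicate, ih hnd'.2]
    by_cases hx : x = k
    · subst hx
      have hxt : x ∉ t := hnd'.1
      simp [hxt]
    · simp [hx, Ne.symm hx]

theorem pv_pairwise_flatMap_repl (S : List Int) (n : Int → Nat) (h : S.Pairwise (· < ·)) :
    (S.flatMap (fun k => List.replicate (n k) k)).Pairwise (· ≤ ·) := by
  induction S with
  | nil => simp
  | cons k t ih =>
    obtain ⟨hk, ht⟩ := List.pairwise_cons.mp h
    rw [List.flatMap_cons]
    rw [List.pairwise_append]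
    refine ⟨List.pairwise_replicate.mpr (Or.inr le_rfl), ih ht, ?_⟩
    intro a ha b hb
    have ha' : a = k := (List.mem_replicate.mp ha).2
    obtain ⟨j, hj, hbj⟩ := List.mem_flatMap.mp hb
    have hb' : b = j := (List.mem_replicate.mp hbj).2
    rw [ha', hb']
    exact le_of_lt (hk j hj)

-- the canonical-counter expansion of A equals B's plain sort
theorem pv_ce (rs : List Int) :
    (PySem.List.sorted (PySem.Dict.counter rs).items (fun kv => kv.1) false).flatMap
        (fun kv => List.replicate kv.2.toNat kv.1)
      = PySem.List.sorted rs (fun x => x) false := by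
  have hndS : (PySem.List.sorted (PySem.Set.ofList rs) (fun x => x) false).Nodup :=
    (PySem.List.sorted_perm (PySem.Set.ofList rs) (fun x => x) false).nodup_iff.mpr
      (PySem.Set.nodup_ofList rs)
  have step1 : PySem.List.sorted (PySem.Dict.counter rs).items (fun kv => kv.1) false
      = (PySem.List.sorted (PySem.Set.ofList rs) (fun x => x) false).map
          (fun k => (k, (rs.count k : Int))) := by
    apply PySem.List.sorted_eq_of_perm_of_pairwise_lt
    · rw [PySem.Dict.items_counter]
      exact (PySem.List.sorted_perm (PySem.Set.ofList rs) (fun x => x) false).map _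
    · rw [List.pairwise_map]
      exact PySem.List.sorted_ofList_pairwise_lt rs
  rw [step1, List.flatMap_map]
  simp only [Int.toNat_natCast]
  symm
  apply PySem.List.sorted_id_eq_of_perm_of_pairwise
  · rw [List.perm_iff_count]
    intro a
    rw [pv_count_flatMap_repl _ _ _ hndS]
    by_cases ha : a ∈ rs
    · rw [if_pos (by simp [PySem.List.mem_sorted, PySem.Set.mem_ofList, ha])]
    · rw [if_neg (by simp [PySem.List.mem_sorted, PySem.Set.mem_ofList, ha]),
        List.count_eq_zero.mpr ha]
  · exact pv_pairwise_flatMap_repl _ _ (PySem.List.sorted_ofList_pairwise_lt rs)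

theorem pv_join_cons (c : List Char) (l : List (List Char)) :
    PySem.Chars.join [] (c :: l) = c ++ PySem.Chars.join [] l := by
  cases l with
  | nil => simp [PySem.Chars.join_singleton, PySem.Chars.join_nil]
  | cons q rest => rw [PySem.Chars.join_cons_cons]; simp

-- A's interned string equals B's interned string
theorem pv_hash_str (rs : List Int) :
    PySem.Str.join "" ("R" :: (PySem.List.sorted (PySem.Dict.counter rs).items (fun kv => kv.1) false).flatMap
        (fun kv => List.replicate kv.2.toNat (PySem.Int.toStr kv.1 ++ ")")))
      = "R" ++ PySem.Str.join "" ((PySem.List.sorted rs (fun x => x) false).map (fun i => PySem.Int.toStr i ++ ")")) := by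
  have hparts : (PySem.List.sorted (PySem.Dict.counter rs).items (fun kv => kv.1) false).flatMap
        (fun kv => List.replicate kv.2.toNat (PySem.Int.toStr kv.1 ++ ")"))
      = (PySem.List.sorted rs (fun x => x) false).map (fun i => PySem.Int.toStr i ++ ")") := by
    have h1 : (PySem.List.sorted (PySem.Dict.counter rs).items (fun kv => kv.1) false).flatMap
          (fun kv => List.replicate kv.2.toNat (PySem.Int.toStr kv.1 ++ ")"))
        = ((PySem.List.sorted (PySem.Dict.counter rs).items (fun kv => kv.1) false).flatMap
            (fun kv => List.replicate kv.2.toNat kv.1)).map (fun i => PySem.Int.toStr i ++ ")") := by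
      rw [List.map_flatMap]
      simp [List.map_replicate]
    rw [h1, pv_ce]
  rw [hparts]
  apply String.toList_inj.mp
  rw [String.toList_append]
  rw [PySem.Str.toList_join, PySem.Str.toList_join]
  rw [List.map_cons]
  rw [show ("".toList : List Char) = [] from rfl]
  rw [pv_join_cons]

theorem pv_arith (c w f : Nat) (hc : c + 2 ≤ w) : 2 + c * w ^ f ≤ w ^ (f + 1) := by
  have h1 : 1 ≤ w ^ f := Nat.one_le_pow _ _ (by omega)
  have h2 : (c + 2) * w ^ f ≤ w * w ^ f := Nat.mul_le_mul_right _ hc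
  rw [pow_succ]
  nlinarith

-- the inner loop: A's fold over the adjacency list vs the machine working through the child frames
theorem pv_IL (tree : List (Int × List Int)) (f : Nat) (u p : Int)
    (HIH : ∀ (u' p' : Int) (uq : PySem.Dict String Int),
      okDFS tree f u' p' = true →
      ∃ r uq2 n, n ≤ pvW tree ^ f ∧ hashA tree f uq u' p' = some (r, uq2) ∧
        ∀ (m : Nat) (rest : List ((Int × Int × Nat) ⊕ (Nat × Nat))) (slots : List (List Int)) (pslot : Nat),
          pslot < slots.length →
          ∃ extra, runB tree (n + m) (Sum.inl (u', p', pslot) :: rest) slots uq =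
            runB tree m rest ((slots.set pslot (slots.getD pslot [] ++ [r])) ++ extra) uq2) :
    ∀ (ns acc : List Int) (uq : PySem.Dict String Int),
    (∀ v ∈ ns, v = p ∨ okDFS tree f v u = true) →
    ∃ rs uqd n, n ≤ ns.length * pvW tree ^ f ∧
      ns.foldl (fun acc' v =>
          match acc' with
          | none => none
          | some (subtrees, uq1) =>
            if v = p then some (subtrees, uq1)
            else
              match hashA tree f uq1 v u with
              | none => none
              | some (idx, uq') => some (subtrees.insert idx (subtrees.getD idx 0 + 1), uq'))
        (some (PySem.Dict.counter acc, uq))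
        = some (PySem.Dict.counter (acc ++ rs), uqd) ∧
      ∀ (m : Nat) (rest : List ((Int × Int × Nat) ⊕ (Nat × Nat))) (slots : List (List Int)) (s : Nat),
        s < slots.length → slots.getD s [] = acc →
        ∃ extra, runB tree (n + m) ((ns.filter (fun v => v ≠ p)).map (fun v => Sum.inl (v, u, s)) ++ rest) slots uq =
          runB tree m rest ((slots.set s (acc ++ rs)) ++ extra) uqd := by
  intro ns
  induction ns with
  | nil =>
    intro acc uq hns
    refine ⟨[], uq, 0, by simp, by simp, ?_⟩
    intro m rest slots s hs hacc
    refine ⟨[], ?_⟩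
    simp only [List.filter_nil, List.map_nil, List.nil_append, Nat.zero_add, List.append_nil]
    rw [← hacc, pv_set_getD_self slots s hs]
  | cons v ns' IH =>
    intro acc uq hns
    by_cases hvp : v = p
    · obtain ⟨rs, uqd, n, hn, hfold, hrun⟩ := IH acc uq
        (fun w hw => hns w (List.mem_cons_of_mem _ hw))
      refine ⟨rs, uqd, n, ?_, ?_, ?_⟩
      · exact le_trans hn (Nat.mul_le_mul_right _ (by simp))
      · rw [List.foldl_cons]
        simpa [hvp] using hfold
      · intro m rest slots s hs hacc
        have hfil : (v :: ns').filter (fun w => w ≠ p) = ns'.filter (fun w => w ≠ p) := by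
          simp [hvp]
        rw [hfil]
        exact hrun m rest slots s hs hacc
    · have hokv : okDFS tree f v u = true := by
        rcases hns v List.mem_cons_self with h | h
        · exact absurd h hvp
        · exact h
      obtain ⟨r1, uq1, n1, hn1, hA1, hrun1⟩ := HIH v u uq hokv
      obtain ⟨rs', uqd, n2, hn2, hfold2, hrun2⟩ := IH (acc ++ [r1]) uq1
        (fun w hw => hns w (List.mem_cons_of_mem _ hw))
      have hstep : PySem.Dict.counter (acc ++ [r1])
          = (PySem.Dict.counter acc).insert r1 ((PySem.Dict.counter acc).getD r1 0 + 1) := by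
        rw [PySem.Dict.counter_append_singleton]
        simp [PySem.Dict.modify]
      refine ⟨r1 :: rs', uqd, n1 + n2, ?_, ?_, ?_⟩
      · rw [List.length_cons, Nat.succ_mul]
        omega
      · rw [List.foldl_cons]
        simp only [if_neg hvp, hA1]
        rw [← hstep]
        rw [hfold2]
        simp [List.append_assoc]
      · intro m rest slots s hs hacc
        have hfil : (v :: ns').filter (fun w => w ≠ p) = v :: ns'.filter (fun w => w ≠ p) := by
          simp [hvp]
        rw [hfil, List.map_cons, List.cons_append]
        rw [show n1 + n2 + m = n1 + (n2 + m) from by omega]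
        obtain ⟨e1, he1⟩ := hrun1 (n2 + m)
          ((ns'.filter (fun w => w ≠ p)).map (fun w => Sum.inl (w, u, s)) ++ rest) slots s hs
        rw [he1, hacc]
        have hs1 : s < ((slots.set s (acc ++ [r1])) ++ e1).length := by
          simp only [List.length_append, List.length_set]
          omega
        obtain ⟨e2, he2⟩ := hrun2 m rest ((slots.set s (acc ++ [r1])) ++ e1) s hs1
          (by rw [pv_getD_append_left _ _ _ (by simpa using hs), pv_getD_set_self _ _ _ hs])
        rw [he2]
        refine ⟨e1 ++ e2, ?_⟩
        have hlists : ((slots.set s (acc ++ [r1]) ++ e1).set s (acc ++ [r1] ++ rs')) ++ e2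
            = (slots.set s (acc ++ (r1 :: rs'))) ++ (e1 ++ e2) := by
          rw [List.set_append, if_pos (by simpa using hs), List.set_set]
          simp [List.append_assoc]
        rw [hlists]

-- the main simulation: A's recursion = the machine consuming one visit frame
theorem pv_ML (tree : List (Int × List Int)) :
    ∀ (f : Nat) (u p : Int) (uq : PySem.Dict String Int),
    okDFS tree f u p = true →
    ∃ r uq2 n, n ≤ pvW tree ^ f ∧ hashA tree f uq u p = some (r, uq2) ∧
      ∀ (m : Nat) (rest : List ((Int × Int × Nat) ⊕ (Nat × Nat))) (slots : List (List Int)) (pslot : Nat),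
        pslot < slots.length →
        ∃ extra, runB tree (n + m) (Sum.inl (u, p, pslot) :: rest) slots uq =
          runB tree m rest ((slots.set pslot (slots.getD pslot [] ++ [r])) ++ extra) uq2 := by
  intro f
  induction f with
  | zero =>
    intro u p uq hok
    simp [okDFS] at hok
  | succ f IHf =>
    intro u p uq hok
    simp only [okDFS] at hok
    cases hget : (PySem.Dict.ofList tree).get? u with
    | none => simp [hget] at hok
    | some neigh =>
      simp only [hget] at hok
      have hall : ∀ v ∈ neigh, v = p ∨ okDFS tree f v u = true := by
        intro v hvm
        have := List.all_eq_true.mp hok v hvm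
        rcases Bool.or_eq_true_iff.mp this with h | h
        · exact Or.inl (by simpa using h)
        · exact Or.inr h
      obtain ⟨rs, uqd, nI, hnI, hfold, hrun⟩ := pv_IL tree f u p IHf neigh [] uq hall
      rw [show PySem.Dict.counter ([] : List Int) = (PySem.Dict.empty : PySem.Dict Int Int) from rfl] at hfold
      simp only [List.nil_append] at hfold hrun
      have hr : ∃ rr, (if uqd.contains (PySem.Str.join "" ("R" :: (PySem.List.sorted (PySem.Dict.counter rs).items (fun kv => kv.1) false).flatMap (fun kv => List.replicate kv.2.toNat (PySem.Int.toStr kv.1 ++ ")")))) then uqd else uqd.insert (PySem.Str.join "" ("R" :: (PySem.List.sorted (PySem.Dict.counter rs).items (fun kv => kv.1) false).flatMap (fun kv => List.replicate kv.2.toNat (PySem.Int.toStr kv.1 ++ ")")))) (uqd.size : Int)).get? (PySem.Str.join "" ("R" :: (PySem.List.sorted (PySem.Dict.counter rs).items (fun kv => kv.1) false).flatMap (fun kv => List.replicate kv.2.toNat (PySem.Int.toStr kv.1 ++ ")")))) = some rr := by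
        by_cases hcth : uqd.contains (PySem.Str.join "" ("R" :: (PySem.List.sorted (PySem.Dict.counter rs).items (fun kv => kv.1) false).flatMap (fun kv => List.replicate kv.2.toNat (PySem.Int.toStr kv.1 ++ ")")))) = true
        · rw [if_pos hcth]
          have := hcth
          rw [PySem.Dict.contains_eq_isSome_get?] at this
          exact Option.isSome_iff_exists.mp this
        · rw [if_neg hcth]
          exact ⟨_, PySem.Dict.get?_insert_self _ _ _⟩
      obtain ⟨r, hrr⟩ := hr
      refine ⟨r, (if uqd.contains (PySem.Str.join "" ("R" :: (PySem.List.sorted (PySem.Dict.counter rs).items (fun kv => kv.1) false).flatMap (fun kv => List.replicate kv.2.toNat (PySem.Int.toStr kv.1 ++ ")")))) then uqd else uqd.insert (PySem.Str.join "" ("R" :: (PySem.List.sorted (PySem.Dict.counter rs).items (fun kv => kv.1) false).flatMap (fun kv => List.replicate kv.2.toNat (PySem.Int.toStr kv.1 ++ ")")))) (uqd.size : Int)), nI + 2, ?_, ?_, ?_⟩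
      · have h2 := pv_neigh_le tree u neigh hget
        have h3 := pv_arith neigh.length (pvW tree) f h2
        have hnI' : nI ≤ neigh.length * pvW tree ^ f := hnI
        omega
      · simp only [hashA, hget, hfold, hrr]
      · intro m rest slots pslot hps
        rw [show nI + 2 + m = (nI + (1 + m)) + 1 from by omega]
        simp only [runB]
        simp only [hget]
        have hsl : slots.length < (slots ++ [[]]).length := by simp
        have hgd : (slots ++ [[]]).getD slots.length [] = [] := by
          rw [List.getD_eq_getElem?_getD, List.getElem?_concat_length]; rfl
        obtain ⟨e1, he1⟩ := hrun (1 + m) (Sum.inr (slots.length, pslot) :: rest) (slots ++ [[]])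
          slots.length hsl hgd
        rw [he1]
        have hset : ((slots ++ ([[]] : List (List Int))).set slots.length rs) = slots ++ [rs] := by
          rw [List.set_append, if_neg (by omega)]
          simp
        rw [hset]
        rw [show 1 + m = m + 1 from by omega]
        simp only [runB]
        have hids : ((slots ++ [rs]) ++ e1).getD slots.length [] = rs := by
          rw [pv_getD_append_left _ _ _ (by simp), List.getD_eq_getElem?_getD,
            List.getElem?_concat_length]; rfl
        rw [hids]
        rw [← pv_hash_str rs]
        simp only [hrr]
        refine ⟨[rs] ++ e1, ?_⟩
        have hgd2 : ((slots ++ [rs]) ++ e1).getD pslot [] = slots.getD pslot [] := by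
          rw [pv_getD_append_left _ _ _ (by simp; omega), pv_getD_append_left _ _ _ hps]
        rw [hgd2]
        have hlists : (((slots ++ [rs]) ++ e1).set pslot (slots.getD pslot [] ++ [r]))
            = (slots.set pslot (slots.getD pslot [] ++ [r])) ++ ([rs] ++ e1) := by
          rw [List.set_append, if_pos (by simp; omega), List.set_append, if_pos hps]
          simp [List.append_assoc]
        rw [hlists]

-- ===== VERDICT (by name: the statement is the Claim_ definition above) =====
theorem hash_tree_spec : Claim_equal_hash_tree := by
  intro tree uniques u p hdom hpre
  unfold Pre_hash_tree at hpre
  unfold Spec_hash_tree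
  obtain ⟨r, uq2, n, hn, hA, hrun⟩ :=
    pv_ML tree (2 * tree.length + 2) u p (PySem.Dict.ofList uniques) hpre
  obtain ⟨extra, hrun'⟩ := hrun (pvW tree ^ (2 * tree.length + 2) - n) [] [[]] 0 (by simp)
  rw [Nat.add_sub_cancel' hn] at hrun'
  unfold hash_tree hash_tree_alt
  rw [hA, hrun']
  simp [runB]
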